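-- pv_equiv track=rewrite | github.com/LolSayna/LearningPatternsfromTextualData | src/patternUtil.py | findMaximalTerminalFactors
-- ===== SOURCE A (Python) =====
-- def isVariable(i):
--     # as defined in the Int Array, an even number is a variable
--     return i % 2 == 0
--
-- def findAllNonVariables(pattern):
--     # aka the maximal terminal factors
--     # finds all the parts of the pattern that are not variables, including the suffix and prefix seperated
--     # pattern -> list of words(string)
--
--     words = []
--     prefix = []
--     suffix = []
--     w = []
--
--     i = 0
--     while i < len(pattern) and not isVariable(pattern[i]):
--         prefix.append(pattern[i])
--         i += 1
--
--     for c in pattern[len(prefix) :]: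
--         if isVariable(c):
--             if w:
--                 words.append(w)
--                 w = []
--         else:
--             w.append(c)
--
--     suffix = w
--
--     return words, prefix, suffix
--
-- def findMaximalTerminalFactors(pattern):
--     words, prefix, suffix = findAllNonVariables(pattern)
--     factors = []
--     if prefix:
--         factors.append(prefix)
--
--     for fact in words:
--         factors.append(fact)
--
--     if suffix:
--         factors.append(suffix)
--
--     return factors
-- ===== SOURCE B (Python) =====
-- def findMaximalTerminalFactors(pattern):
--     # single index scan: each maximal run of odd (non-variable) elements is one slice
--     factors = []
--     i = 0
--     n = len(pattern)
--     while i < n: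
--         if pattern[i] % 2 == 0:
--             i += 1
--         else:
--             j = i
--             while j < n and pattern[j] % 2 != 0:
--                 j += 1
--             factors.append(pattern[i:j])
--             i = j
--     return factors
-- ===== Notes on version B (the rewrite author's own statement) =====
-- stated objective: simpler
-- what changed: Replaces A's three-phase helper (prefix while-loop, flush-based accumulator loop, suffix/prefix reassembly) with a single index scan that slices out each maximal run of non-variable elements directly.
import Mathlib
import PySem

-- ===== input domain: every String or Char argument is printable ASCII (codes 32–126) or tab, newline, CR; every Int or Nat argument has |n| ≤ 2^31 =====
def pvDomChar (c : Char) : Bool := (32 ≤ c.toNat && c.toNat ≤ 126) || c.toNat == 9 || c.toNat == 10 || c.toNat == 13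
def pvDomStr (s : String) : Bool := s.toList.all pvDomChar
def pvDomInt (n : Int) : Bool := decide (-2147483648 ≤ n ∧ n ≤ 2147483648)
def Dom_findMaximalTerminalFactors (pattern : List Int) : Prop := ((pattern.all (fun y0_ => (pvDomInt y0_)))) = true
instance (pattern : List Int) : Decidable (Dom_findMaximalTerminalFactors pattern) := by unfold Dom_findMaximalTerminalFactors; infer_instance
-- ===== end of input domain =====

-- B replaces A's prefix/flush/suffix state machine with one scan slicing out maximal non-variable runs (simpler).


-- ===== PORT A =====
-- isVariable(i): even numbers are variables
def isVariableA (i : Int) : Bool := PySem.Int.mod i 2 == 0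

-- the initial while-loop collecting the prefix of non-variables
def aPrefix : List Int → List Int
  | [] => []
  | x :: xs => if isVariableA x then [] else x :: aPrefix xs

-- the for-loop over pattern[len(prefix):] with state (words, w)
def aLoop : List Int → List (List Int) → List Int → (List (List Int)) × List Int
  | [], words, w => (words, w)
  | c :: rest, words, w =>
    if isVariableA c then
      if w ≠ [] then aLoop rest (words ++ [w]) [] else aLoop rest words w
    else
      aLoop rest words (w ++ [c])

def findAllNonVariablesA (pattern : List Int) : (List (List Int)) × (List Int) × (List Int) :=
  let pre := aPrefix pattern
  let r := aLoop (pattern.drop pre.length) [] []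
  (r.1, pre, r.2)

def findMaximalTerminalFactors (pattern : List Int) : List (List Int) :=
  let r := findAllNonVariablesA pattern
  (if r.2.1 ≠ [] then [r.2.1] else []) ++ r.1 ++ (if r.2.2 ≠ [] then [r.2.2] else [])

-- ===== PORT B =====
-- one scan: skip a variable, or slice out the maximal run of non-variables starting here
def findMaximalTerminalFactors_alt : List Int → List (List Int)
  | [] => []
  | x :: xs =>
    if PySem.Int.mod x 2 == 0 then
      findMaximalTerminalFactors_alt xs
    else
      (x :: xs.takeWhile (fun y => !(PySem.Int.mod y 2 == 0))) ::
        findMaximalTerminalFactors_alt (xs.dropWhile (fun y => !(PySem.Int.mod y 2 == 0)))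
  termination_by l => l.length
  decreasing_by
    · simp only [List.length_cons]; omega
    · have := List.length_dropWhile_le (fun y => !(PySem.Int.mod y 2 == 0)) xs
      simp only [List.length_cons]; omega

-- ===== PRECONDITION & SPEC =====
def Spec_findMaximalTerminalFactors (pattern : List Int) (out : List (List Int)) : Prop := out = findMaximalTerminalFactors_alt pattern
instance (pattern : List Int) (out : List (List Int)) : Decidable (Spec_findMaximalTerminalFactors pattern out) := by unfold Spec_findMaximalTerminalFactors; infer_instance

-- ===== CLAIM (what is proved, stated in full; the proofs are below) =====
def Claim_equal_findMaximalTerminalFactors : Prop := ∀ (pattern : List Int), Dom_findMaximalTerminalFactors pattern → Spec_findMaximalTerminalFactors pattern (findMaximalTerminalFactors pattern)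

-- ===== LEMMAS AND PROOFS =====

theorem mod2_true {c : Int} (hv : (PySem.Int.mod c 2 == 0) = true) : c % 2 = 0 := by
  have h := PySem.Int.mod_eq_emod_of_pos (a := c) (b := 2) (by omega)
  rw [h] at hv
  simpa using hv

theorem mod2_false {c : Int} (hv : (PySem.Int.mod c 2 == 0) = false) : c % 2 = 1 := by
  have h := PySem.Int.mod_eq_emod_of_pos (a := c) (b := 2) (by omega)
  rw [h] at hv
  have : ¬ c % 2 = 0 := by simpa using hv
  omega

-- the factors A still produces from remaining input cs with current run w
def G (cs : List Int) (w : List Int) : List (List Int) :=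
  (aLoop cs [] w).1 ++ (if (aLoop cs [] w).2 ≠ [] then [(aLoop cs [] w).2] else [])

theorem aLoop_acc (cs : List Int) (words : List (List Int)) (w : List Int) :
    aLoop cs words w = (words ++ (aLoop cs [] w).1, (aLoop cs [] w).2) := by
  induction cs generalizing words w with
  | nil => simp [aLoop]
  | cons c rest ih =>
    by_cases hv : isVariableA c = true
    · by_cases hw : w = []
      · subst hw
        simp only [aLoop, hv, if_true, ne_eq, not_true_eq_false, if_false]
        simpa using ih words []
      · simp only [aLoop, hv, if_true, ne_eq, hw, not_false_eq_true, if_true, List.nil_append]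
        rw [ih (words ++ [w]) []]
        rw [ih [w] []]
        simp
    · simp only [aLoop, hv, if_false, Bool.false_eq_true, List.nil_append]
      rw [ih words (w ++ [c]), ih [] (w ++ [c])]

theorem G_char (cs : List Int) :
    (∀ w, w ≠ [] →
      G cs w = (w ++ cs.takeWhile (fun y => !(PySem.Int.mod y 2 == 0))) ::
        findMaximalTerminalFactors_alt (cs.dropWhile (fun y => !(PySem.Int.mod y 2 == 0)))) ∧
    G cs [] = findMaximalTerminalFactors_alt cs := by
  induction cs with
  | nil => simp [G, aLoop, findMaximalTerminalFactors_alt]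
  | cons c rest ih =>
    cases hv : (PySem.Int.mod c 2 == 0) with
    | true =>
      have hva : isVariableA c = true := hv
      have h0 : c % 2 = 0 := mod2_true hv
      have hd : (2:Int) ∣ c := by omega
      constructor
      · intro w hw
        have hstep : G (c :: rest) w = w :: G rest [] := by
          simp only [G, aLoop, hva, if_true, ne_eq, hw, not_false_eq_true, List.nil_append]
          rw [aLoop_acc rest [w] []]
          simp
        rw [hstep, ih.2]
        have ht : List.takeWhile (fun y => !(PySem.Int.mod y 2 == 0)) (c :: rest) = [] := by
          simp [List.takeWhile_cons, hv, h0, hd]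
        have hdw : List.dropWhile (fun y => !(PySem.Int.mod y 2 == 0)) (c :: rest) = c :: rest := by
          simp [List.dropWhile_cons, hv, h0, hd]
        rw [ht, hdw]
        conv_rhs => rw [findMaximalTerminalFactors_alt]
        simp [hv, h0, hd]
      · have hstep : G (c :: rest) [] = G rest [] := by
          simp [G, aLoop, hva]
        rw [hstep, ih.2]
        conv_rhs => rw [findMaximalTerminalFactors_alt]
        simp [hv, h0, hd]
    | false =>
      have hva : isVariableA c = false := hv
      have h1 : c % 2 = 1 := mod2_false hv
      have hnd : ¬ (2:Int) ∣ c := by omega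
      have hstep : ∀ w, G (c :: rest) w = G rest (w ++ [c]) := by
        intro w
        simp [G, aLoop, hva]
      have hrun : ∀ w, G (c :: rest) w =
          (w ++ (c :: rest.takeWhile (fun y => !(PySem.Int.mod y 2 == 0)))) ::
            findMaximalTerminalFactors_alt (rest.dropWhile (fun y => !(PySem.Int.mod y 2 == 0))) := by
        intro w
        rw [hstep w, ih.1 (w ++ [c]) (by simp)]
        simp
      constructor
      · intro w hw
        rw [hrun w, List.takeWhile_cons, List.dropWhile_cons]
        simp [hv, h1, hnd]
      · rw [hrun []]
        conv_rhs => rw [findMaximalTerminalFactors_alt]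
        simp [hv, h1, hnd]

theorem aPrefix_eq_takeWhile (l : List Int) :
    aPrefix l = l.takeWhile (fun y => !(PySem.Int.mod y 2 == 0)) := by
  induction l with
  | nil => rfl
  | cons x xs ih =>
    cases hv : (PySem.Int.mod x 2 == 0) with
    | true =>
      have hva : isVariableA x = true := hv
      have h0 : x % 2 = 0 := mod2_true hv
      have hd : (2:Int) ∣ x := by omega
      simp [aPrefix, hva, List.takeWhile_cons, hv, h0, hd]
    | false =>
      have hva : isVariableA x = false := hv
      have h1 : x % 2 = 1 := mod2_false hv
      have hnd : ¬ (2:Int) ∣ x := by omega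
      simp [aPrefix, hva, List.takeWhile_cons, hv, h1, hnd, ih]

theorem drop_length_takeWhile {α : Type} (p : α → Bool) (l : List α) :
    l.drop (l.takeWhile p).length = l.dropWhile p := by
  induction l with
  | nil => rfl
  | cons x xs ih =>
    cases h : p x <;> simp [List.takeWhile_cons, List.dropWhile_cons, h, ih]

-- ===== VERDICT (by name: the statement is the Claim_ definition above) =====
theorem findMaximalTerminalFactors_spec : Claim_equal_findMaximalTerminalFactors := by
  intro pattern _
  show findMaximalTerminalFactors pattern = findMaximalTerminalFactors_alt pattern
  simp only [findMaximalTerminalFactors, findAllNonVariablesA, aPrefix_eq_takeWhile,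
    drop_length_takeWhile]
  cases pattern with
  | nil => simp [aLoop, findMaximalTerminalFactors_alt]
  | cons x xs =>
    cases hv : (PySem.Int.mod x 2 == 0) with
    | true =>
      have h0 : x % 2 = 0 := mod2_true hv
      have hd : (2:Int) ∣ x := by omega
      have h1 : List.takeWhile (fun y => !(PySem.Int.mod y 2 == 0)) (x :: xs) = [] := by
        simp [List.takeWhile_cons, hv, h0, hd]
      have h2 : List.dropWhile (fun y => !(PySem.Int.mod y 2 == 0)) (x :: xs) = x :: xs := by
        simp [List.dropWhile_cons, hv, h0, hd]
      rw [h1, h2]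
      have := (G_char (x :: xs)).2
      simp only [G] at this
      simpa using this
    | false =>
      have ho : x % 2 = 1 := mod2_false hv
      have hnd : ¬ (2:Int) ∣ x := by omega
      have h1 : List.takeWhile (fun y => !(PySem.Int.mod y 2 == 0)) (x :: xs) =
          x :: List.takeWhile (fun y => !(PySem.Int.mod y 2 == 0)) xs := by
        simp [List.takeWhile_cons, hv, ho, hnd]
      have hne : List.takeWhile (fun y => !(PySem.Int.mod y 2 == 0)) (x :: xs) ≠ [] := by
        rw [h1]; simp
      have hdw : List.dropWhile (fun y => !(PySem.Int.mod y 2 == 0)) (x :: xs) =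
          List.dropWhile (fun y => !(PySem.Int.mod y 2 == 0)) xs := by
        simp [List.dropWhile_cons, hv, ho, hnd]
      have hG := (G_char (List.dropWhile (fun y => !(PySem.Int.mod y 2 == 0)) (x :: xs))).2
      simp only [G] at hG
      simp only [ne_eq, hne, not_false_eq_true, if_true]
      rw [List.append_assoc, hG, hdw, h1]
      conv_rhs => rw [findMaximalTerminalFactors_alt]
      simp [hv, ho, hnd]
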